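-- pv_equiv track=rewrite | github.com/Lum1e/PVA | skibidi fortnite.py | find_intervals_with_same_sum
-- ===== SOURCE A (Python) =====
-- def find_intervals_with_same_sum(sequence):
--     n = len(sequence)
--     sum_intervals = {}  # slovník pro uložení součtů a intervalů, které k nim patří
--
--     # Generovat všechny intervaly délky alespoň 2
--     for start in range(n):
--         for end in range(start + 1, n):
--             interval_sum = sum(sequence[start:end + 1])
--             if interval_sum not in sum_intervals:
--                 sum_intervals[interval_sum] = []
--             sum_intervals[interval_sum].append((start, end))
--
--     # Počítat počet dvojic různých intervalů se stejným součtem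
--     count_pairs = 0
--     for intervals in sum_intervals.values():
--         if len(intervals) > 1:
--             count_pairs += len(intervals) * (len(intervals) - 1) // 2
--
--     return count_pairs
-- ===== SOURCE B (Python) =====
-- def find_intervals_with_same_sum(sequence):
--     n = len(sequence)
--     # prefix[i] = sum of the first i elements, so any interval sum is one subtraction
--     prefix = [0]
--     for x in sequence:
--         prefix.append(prefix[-1] + x)
--     seen = {}
--     count_pairs = 0
--     for start in range(n):
--         for end in range(start + 1, n):
--             interval_sum = prefix[end + 1] - prefix[start]
--             count_pairs += seen.get(interval_sum, 0)
--             seen[interval_sum] = seen.get(interval_sum, 0) + 1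
--     return count_pairs
-- ===== Notes on version B (the rewrite author's own statement) =====
-- stated objective: faster
-- what changed: A sums each slice from scratch (O(n^3)) and groups intervals into dict-of-lists then counts C(k,2) per group in a second pass; B precomputes prefix sums so each interval sum is one subtraction and counts equal-sum pairs incrementally with a counter dict in a single pass, never storing the intervals.
import Mathlib
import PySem

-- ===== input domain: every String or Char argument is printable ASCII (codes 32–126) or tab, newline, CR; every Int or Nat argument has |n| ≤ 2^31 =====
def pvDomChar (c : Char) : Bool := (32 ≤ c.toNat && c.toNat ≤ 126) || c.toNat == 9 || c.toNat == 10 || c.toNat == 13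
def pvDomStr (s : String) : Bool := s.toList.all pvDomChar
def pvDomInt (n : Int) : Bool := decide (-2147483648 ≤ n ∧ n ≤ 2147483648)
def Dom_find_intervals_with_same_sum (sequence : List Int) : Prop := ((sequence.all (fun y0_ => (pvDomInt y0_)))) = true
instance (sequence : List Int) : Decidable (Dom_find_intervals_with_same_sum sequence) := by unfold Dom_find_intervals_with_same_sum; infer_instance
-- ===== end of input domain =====

-- B replaces A's O(n^3) slice-summing + dict-of-interval-lists with an O(n^2) prefix-sum
-- pass that counts equal-sum pairs incrementally; proved to return the same count on every input.


-- ===== PORT A =====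
def find_intervals_with_same_sum (sequence : List Int) : Int :=
  let n : Int := (sequence.length : Int)
  let sum_intervals : PySem.Dict Int (List (Int × Int)) :=
    (PySem.List.pyRange 0 n 1).foldl (fun d start =>
      (PySem.List.pyRange (start + 1) n 1).foldl (fun d end_ =>
        let interval_sum := (PySem.List.slice sequence (some start) (some (end_ + 1))).sum
        let d := if d.contains interval_sum then d else d.insert interval_sum []
        d.modify interval_sum [] (fun l => l ++ [(start, end_)])) d) PySem.Dict.empty
  sum_intervals.values.foldl (fun count_pairs intervals =>
    if 1 < intervals.length then
      count_pairs + PySem.Int.floordiv ((intervals.length : Int) * ((intervals.length : Int) - 1)) 2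
    else count_pairs) 0

-- ===== PORT B =====
-- prefix[-1], prefix[end+1] and prefix[start] are always in range, so pyGetD with default 0 is exact
def find_intervals_with_same_sum_alt (sequence : List Int) : Int :=
  let n : Int := (sequence.length : Int)
  let pfx := sequence.foldl (fun pre x => pre ++ [PySem.List.pyGetD pre (-1) 0 + x]) [(0 : Int)]
  let st := (PySem.List.pyRange 0 n 1).foldl (fun st start =>
    (PySem.List.pyRange (start + 1) n 1).foldl (fun st end_ =>
      let interval_sum := PySem.List.pyGetD pfx (end_ + 1) 0 - PySem.List.pyGetD pfx start 0
      (st.1.insert interval_sum (st.1.getD interval_sum 0 + 1), st.2 + st.1.getD interval_sum 0))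
      st) ((PySem.Dict.empty : PySem.Dict Int Int), (0 : Int))
  st.2

-- ===== PRECONDITION & SPEC =====
def Spec_find_intervals_with_same_sum (sequence : List Int) (out : Int) : Prop := out = find_intervals_with_same_sum_alt sequence
instance (sequence : List Int) (out : Int) : Decidable (Spec_find_intervals_with_same_sum sequence out) := by unfold Spec_find_intervals_with_same_sum; infer_instance

-- ===== CLAIM (what is proved, stated in full; the proofs are below) =====
def Claim_equal_find_intervals_with_same_sum : Prop := ∀ (sequence : List Int), Dom_find_intervals_with_same_sum sequence → Spec_find_intervals_with_same_sum sequence (find_intervals_with_same_sum sequence)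

-- ===== LEMMAS AND PROOFS =====

-- the interval sum A computes for the pair p = (start, end)
def pvKey (sequence : List Int) (p : Int × Int) : Int :=
  (PySem.List.slice sequence (some p.1) (some (p.2 + 1))).sum
-- all (start, end) pairs with start < end, in loop order
def pvPairs (n : Int) : List (Int × Int) :=
  (PySem.List.pyRange 0 n 1).flatMap (fun s => (PySem.List.pyRange (s + 1) n 1).map (fun e => (s, e)))
-- k*(k-1)//2
def pvC2 (k : Int) : Int := PySem.Int.floordiv (k * (k - 1)) 2
-- A's final count as a function of the multiset of interval sums
def pvS (ss : List Int) : Int :=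
  ((PySem.Set.ofList ss).map (fun c => pvC2 ((ss.count c : Nat) : Int))).sum
-- number of equal-sum pairs between an already-seen list t and a yet-to-come list
def pvAcross : List Int → List Int → Int
  | _, [] => 0
  | t, s :: ss => ((t.count s : Nat) : Int) + pvAcross (t ++ [s]) ss
-- B's per-interval counting step on the (seen, count) state
def pvStep (st : PySem.Dict Int Int × Int) (s : Int) : PySem.Dict Int Int × Int :=
  (st.1.insert s (st.1.getD s 0 + 1), st.2 + st.1.getD s 0)

lemma pv_stepA (d : PySem.Dict Int (List (Int × Int))) (s : Int) (f : List (Int × Int) → List (Int × Int)) :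
    (if d.contains s then d else d.insert s []).modify s [] f = d.modify s [] f := by
  by_cases h : d.contains s
  · simp [h]
  · have hf : d.contains s = false := by simpa using h
    simp [hf, PySem.Dict.modify, PySem.Dict.getD_insert_self, PySem.Dict.insert_insert_self,
      PySem.Dict.getD_of_not_contains d _ hf]
lemma pv_pfx_eq (sequence : List Int) :
    sequence.foldl (fun pre x => pre ++ [PySem.List.pyGetD pre (-1) 0 + x]) [(0 : Int)]
      = (List.range (sequence.length + 1)).map (fun i => ((sequence.take i).sum)) := by
  induction sequence using List.reverseRecOn with
  | nil => simp
  | append_singleton xs x ih =>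
    rw [List.foldl_append, ih]
    have hlast : PySem.List.pyGetD ((List.range (xs.length + 1)).map (fun i => ((xs.take i).sum))) (-1) 0 = xs.sum := by
      simp [PySem.List.pyGetD, PySem.List.pyGet?, PySem.List.pyIdx?]
    simp only [List.foldl_cons, List.foldl_nil, hlast]
    rw [List.length_append, List.length_cons, List.length_nil]
    rw [show List.range (xs.length + 1 + 1) = List.range (xs.length + 1) ++ [xs.length + 1] from List.range_succ,
        List.map_append]
    congr 1
    · apply List.map_congr_left
      intro i hi
      rw [List.mem_range] at hi
      rw [List.take_append_of_le_length (by omega)]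
    · simp
lemma pv_take_sub (seq : List Int) (a b : Nat) (hab : a ≤ b) :
    ((seq.drop a).take (b - a)).sum = (seq.take b).sum - (seq.take a).sum := by
  have h : seq.take b = seq.take a ++ (seq.drop a).take (b - a) := by
    rw [← List.take_add (l := seq) (i := a) (j := b - a)]
    congr 1; omega
  rw [h, List.sum_append]; ring
lemma pv_key_eq (sequence : List Int) (s e : Int) (hs : 0 ≤ s) (hse : s < e) (he : e < (sequence.length : Int)) :
    PySem.List.pyGetD ((List.range (sequence.length + 1)).map (fun i => ((sequence.take i).sum))) (e + 1) 0
      - PySem.List.pyGetD ((List.range (sequence.length + 1)).map (fun i => ((sequence.take i).sum))) s 0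
      = pvKey sequence (s, e) := by
  have h1 : PySem.List.pyGetD ((List.range (sequence.length + 1)).map (fun i => ((sequence.take i).sum))) (e + 1) 0
      = (sequence.take (e + 1).toNat).sum := by
    rw [PySem.List.pyGetD_of_nonneg _ _ (by omega)]
    exact PySem.List.getD_map_range _ _ _ _ (by omega)
  have h2 : PySem.List.pyGetD ((List.range (sequence.length + 1)).map (fun i => ((sequence.take i).sum))) s 0
      = (sequence.take s.toNat).sum := by
    rw [PySem.List.pyGetD_of_nonneg _ _ hs]
    exact PySem.List.getD_map_range _ _ _ _ (by omega)
  rw [h1, h2, pvKey]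
  have hsl : PySem.List.slice sequence (some s) (some (e + 1))
      = (sequence.drop s.toNat).take ((e + 1).toNat - s.toNat) := by
    have hc : ∀ i : Int, 0 ≤ i → i ≤ (sequence.length : Int) → PySem.List.clampIdx sequence.length i = i.toNat := by
      intro i h0 hn
      simp only [PySem.List.clampIdx]
      rw [if_neg (by omega)]
      omega
    simp only [PySem.List.slice, hc s hs (by omega), hc (e + 1) (by omega) (by omega)]
  rw [hsl, pv_take_sub _ _ _ (by omega)]
lemma pv_inc (ss : List Int) : ∀ (t : List Int) (acc : Int),
    (ss.foldl pvStep (PySem.Dict.counter t, acc)).2 = acc + pvAcross t ss := by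
  induction ss with
  | nil => intro t acc; simp [pvAcross]
  | cons s ss ih =>
    intro t acc
    have h1 : pvStep (PySem.Dict.counter t, acc) s = (PySem.Dict.counter (t ++ [s]), acc + ((t.count s : Nat) : Int)) := by
      rw [PySem.Dict.counter_append_singleton]
      simp [pvStep, PySem.Dict.modify, PySem.Dict.getD_counter]
    rw [List.foldl_cons, h1, ih]
    simp [pvAcross]; ring
lemma pv_c2_succ (k : Nat) : pvC2 (((k + 1 : Nat)) : Int) = pvC2 ((k : Nat) : Int) + (k : Int) := by
  have h2 : (0:Int) < 2 := by norm_num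
  unfold pvC2
  simp only [PySem.Int.floordiv_eq_ediv_of_pos h2]
  obtain ⟨m, hm⟩ : Even ((k:Int) * ((k:Int) - 1)) := Int.even_mul_pred_self _
  have e1 : (k:Int) * ((k:Int) - 1) = 2 * m := by omega
  have e2 : ((k:Int) + 1) * ((k:Int) + 1 - 1) = 2 * (m + k) := by nlinarith [hm]
  push_cast [e1]
  rw [show ((k:Int) + 1) * ((k:Int) + 1 - 1) = 2 * (m + k) from e2]
  omega
lemma pv_sum_map_update (l : List Int) (hl : l.Nodup) (s : Int) (hs : s ∈ l) (f g : Int → Int) (δ : Int)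
    (hfg : ∀ c ∈ l, c ≠ s → f c = g c) (hfs : f s = g s + δ) :
    (l.map f).sum = (l.map g).sum + δ := by
  induction l with
  | nil => cases hs
  | cons a l ih =>
    rcases List.mem_cons.mp hs with rfl | hs'
    · have hnl : s ∉ l := (List.nodup_cons.mp hl).1
      have hrest : ∀ c ∈ l, f c = g c := fun c hc => hfg c (List.mem_cons_of_mem _ hc) (fun h => hnl (h ▸ hc))
      simp [List.map_congr_left hrest, hfs]; ring
    · have ha : a ≠ s := fun h => (List.nodup_cons.mp hl).1 (h ▸ hs')
      have := ih (List.nodup_cons.mp hl).2 hs' (fun c hc hne => hfg c (List.mem_cons_of_mem _ hc) hne)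
      simp only [List.map_cons, List.sum_cons, this, hfg a List.mem_cons_self ha]
      ring
lemma pv_S_append (t : List Int) (s : Int) :
    pvS (t ++ [s]) = pvS t + ((t.count s : Nat) : Int) := by
  have hof : PySem.Set.ofList (t ++ [s]) = (PySem.Set.ofList t).add s := by
    rw [PySem.Set.ofList_append, PySem.Set.update_cons, PySem.Set.update_nil]
  have hcount : ∀ c : Int, (t ++ [s]).count c = t.count c + if c = s then 1 else 0 := by
    intro c
    rw [List.count_append]
    by_cases h : c = s
    · subst h; simp
    · simp [h, Ne.symm h]
  by_cases hmem : s ∈ t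
  · have hadd : (PySem.Set.ofList t).add s = PySem.Set.ofList t := by
      simp [PySem.Set.add, PySem.Set.mem_ofList, hmem]
    rw [pvS, hof, hadd]
    have key := pv_sum_map_update (PySem.Set.ofList t) (PySem.Set.nodup_ofList t) s
      ((PySem.Set.mem_ofList t s).mpr hmem)
      (fun c => pvC2 (((t ++ [s]).count c : Nat) : Int))
      (fun c => pvC2 ((t.count c : Nat) : Int))
      ((t.count s : Nat) : Int)
      (by intro c _ hcs; beta_reduce; rw [hcount c, if_neg hcs]; norm_num)
      (by beta_reduce; rw [hcount s, if_pos rfl]; exact pv_c2_succ _)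
    rw [key]; rfl
  · have hadd : (PySem.Set.ofList t).add s = PySem.Set.ofList t ++ [s] := by
      simp [PySem.Set.add, PySem.Set.mem_ofList, hmem]
    rw [pvS, hof, hadd, List.map_append, List.sum_append]
    have h1 : (PySem.Set.ofList t).map (fun c => pvC2 (((t ++ [s]).count c : Nat) : Int))
        = (PySem.Set.ofList t).map (fun c => pvC2 ((t.count c : Nat) : Int)) := by
      apply List.map_congr_left
      intro c hc
      have hcs : c ≠ s := fun h => hmem (h ▸ (PySem.Set.mem_ofList t c).mp hc)
      rw [hcount c, if_neg hcs]; norm_num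
    have h2 : (t ++ [s]).count s = 1 := by
      rw [hcount s, if_pos rfl, List.count_eq_zero_of_not_mem hmem]
    have h3 : t.count s = 0 := List.count_eq_zero_of_not_mem hmem
    have h4 : pvC2 1 = 0 := by decide
    rw [h1]
    simp [h3, h4, pvS]
lemma pv_S_across (ss : List Int) : ∀ t : List Int, pvS (t ++ ss) = pvS t + pvAcross t ss := by
  induction ss with
  | nil => intro t; simp [pvAcross]
  | cons s ss ih =>
    intro t
    rw [show t ++ s :: ss = (t ++ [s]) ++ ss by simp, ih, pv_S_append, pvAcross]
    ring
lemma pv_c2_le_one (k : Nat) (hk : k ≤ 1) : pvC2 ((k : Nat) : Int) = 0 := by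
  interval_cases k <;> decide
lemma pv_B_eq (sequence : List Int) :
    find_intervals_with_same_sum_alt sequence
      = pvAcross [] ((pvPairs (sequence.length : Int)).map (pvKey sequence)) := by
  simp only [find_intervals_with_same_sum_alt, pv_pfx_eq]
  have h1 : (PySem.List.pyRange 0 (sequence.length : Int) 1).foldl (fun st start =>
      (PySem.List.pyRange (start + 1) (sequence.length : Int) 1).foldl (fun st end_ =>
        (st.1.insert (PySem.List.pyGetD ((List.range (sequence.length + 1)).map (fun i => ((sequence.take i).sum))) (end_ + 1) 0 - PySem.List.pyGetD ((List.range (sequence.length + 1)).map (fun i => ((sequence.take i).sum))) start 0)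
          (st.1.getD (PySem.List.pyGetD ((List.range (sequence.length + 1)).map (fun i => ((sequence.take i).sum))) (end_ + 1) 0 - PySem.List.pyGetD ((List.range (sequence.length + 1)).map (fun i => ((sequence.take i).sum))) start 0) 0 + 1),
         st.2 + st.1.getD (PySem.List.pyGetD ((List.range (sequence.length + 1)).map (fun i => ((sequence.take i).sum))) (end_ + 1) 0 - PySem.List.pyGetD ((List.range (sequence.length + 1)).map (fun i => ((sequence.take i).sum))) start 0) 0))
      st) ((PySem.Dict.empty : PySem.Dict Int Int), (0 : Int))
      = List.foldl (fun st p => pvStep st (pvKey sequence p)) ((PySem.Dict.empty : PySem.Dict Int Int), (0 : Int)) (pvPairs (sequence.length : Int)) := by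
    rw [pvPairs, List.foldl_flatMap]
    apply PySem.List.foldl_congr_mem
    intro st start hstart
    rw [List.foldl_map]
    apply PySem.List.foldl_congr_mem
    intro st' e he
    rw [PySem.List.mem_pyRange_one] at hstart he
    rw [show pvKey sequence (start, e)
        = PySem.List.pyGetD ((List.range (sequence.length + 1)).map (fun i => ((sequence.take i).sum))) (e + 1) 0
          - PySem.List.pyGetD ((List.range (sequence.length + 1)).map (fun i => ((sequence.take i).sum))) start 0
      from (pv_key_eq sequence start e hstart.1 (by omega) (by omega)).symm]
    rfl
  rw [h1, ← List.foldl_map]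
  have := pv_inc ((pvPairs (sequence.length : Int)).map (pvKey sequence)) [] 0
  simpa using this
lemma pv_A_eq (sequence : List Int) :
    find_intervals_with_same_sum sequence
      = pvS ((pvPairs (sequence.length : Int)).map (pvKey sequence)) := by
  simp only [find_intervals_with_same_sum]
  have hd : (PySem.List.pyRange 0 (sequence.length : Int) 1).foldl (fun d start =>
      (PySem.List.pyRange (start + 1) (sequence.length : Int) 1).foldl (fun d end_ =>
        (if d.contains ((PySem.List.slice sequence (some start) (some (end_ + 1))).sum) then d
         else d.insert ((PySem.List.slice sequence (some start) (some (end_ + 1))).sum) []).modify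
          ((PySem.List.slice sequence (some start) (some (end_ + 1))).sum) [] (fun l => l ++ [(start, end_)])) d)
      (PySem.Dict.empty : PySem.Dict Int (List (Int × Int)))
      = List.foldl (fun d p => d.modify (pvKey sequence p) [] (fun l => l ++ [p]))
          PySem.Dict.empty (pvPairs (sequence.length : Int)) := by
    rw [pvPairs, List.foldl_flatMap]
    apply PySem.List.foldl_congr_mem
    intro d start _
    rw [List.foldl_map]
    apply PySem.List.foldl_congr_mem
    intro d' e _
    have := pv_stepA d' ((PySem.List.slice sequence (some start) (some (e + 1))).sum) (fun l => l ++ [(start, e)])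
    simpa [pvKey] using this
  rw [hd]
  have hnodup : (List.foldl (fun d p => d.modify (pvKey sequence p) [] (fun l => l ++ [p]))
      PySem.Dict.empty (pvPairs (sequence.length : Int))).keys.Nodup := by
    have := PySem.Dict.nodup_keys_foldl_modify_key (pvPairs (sequence.length : Int))
      (fun p => pvKey sequence p) [] (fun _ p l => l ++ [p]) PySem.Dict.empty (by simp [PySem.Dict.keys_empty])
    simpa using this
  have hkeys : (List.foldl (fun d p => d.modify (pvKey sequence p) [] (fun l => l ++ [p]))
      PySem.Dict.empty (pvPairs (sequence.length : Int))).keys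
      = PySem.Set.ofList ((pvPairs (sequence.length : Int)).map (pvKey sequence)) := by
    have := PySem.Dict.keys_foldl_modify_key (pvPairs (sequence.length : Int))
      (fun p => pvKey sequence p) [] (fun _ p l => l ++ [p]) PySem.Dict.empty
    simpa [PySem.Dict.keys_empty, PySem.Set.update_nil_left] using this
  have hlen : ∀ c : Int, ((List.foldl (fun d p => d.modify (pvKey sequence p) [] (fun l => l ++ [p]))
      PySem.Dict.empty (pvPairs (sequence.length : Int))).getD c []).length
      = ((pvPairs (sequence.length : Int)).map (pvKey sequence)).count c := by
    intro c
    have hre : (List.foldl (fun d p => d.modify (pvKey sequence p) [] (fun l => l ++ [p]))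
        PySem.Dict.empty (pvPairs (sequence.length : Int)))
        = List.foldl (fun d q => d.modify q.1 [] (fun l => l ++ [q.2]))
            PySem.Dict.empty ((pvPairs (sequence.length : Int)).map (fun p => (pvKey sequence p, p))) := by
      rw [List.foldl_map]
    rw [hre, PySem.Dict.getD_foldl_modify_append]
    simp only [PySem.Dict.getD_empty, List.nil_append, List.length_map]
    rw [← List.countP_eq_length_filter, List.countP_map, List.count, List.countP_map]
    rfl
  rw [PySem.Dict.values_eq_map_keys _ hnodup [], List.foldl_map]
  have hbody : List.foldl (fun acc k =>
      if 1 < ((List.foldl (fun d p => d.modify (pvKey sequence p) [] (fun l => l ++ [p]))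
          PySem.Dict.empty (pvPairs (sequence.length : Int))).getD k []).length then
        acc + PySem.Int.floordiv
          ((((List.foldl (fun d p => d.modify (pvKey sequence p) [] (fun l => l ++ [p]))
            PySem.Dict.empty (pvPairs (sequence.length : Int))).getD k []).length : Int)
           * ((((List.foldl (fun d p => d.modify (pvKey sequence p) [] (fun l => l ++ [p]))
            PySem.Dict.empty (pvPairs (sequence.length : Int))).getD k []).length : Int) - 1)) 2
      else acc) 0
      (List.foldl (fun d p => d.modify (pvKey sequence p) [] (fun l => l ++ [p]))
        PySem.Dict.empty (pvPairs (sequence.length : Int))).keys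
      = List.foldl (fun acc k => acc + pvC2 ((((pvPairs (sequence.length : Int)).map (pvKey sequence)).count k : Nat) : Int)) 0
          (List.foldl (fun d p => d.modify (pvKey sequence p) [] (fun l => l ++ [p]))
            PySem.Dict.empty (pvPairs (sequence.length : Int))).keys := by
    apply PySem.List.foldl_congr_mem
    intro acc k _
    rw [hlen k]
    by_cases h1 : 1 < ((pvPairs (sequence.length : Int)).map (pvKey sequence)).count k
    · rw [if_pos h1]; rfl
    · rw [if_neg h1, pv_c2_le_one _ (by omega)]; ring
  rw [hbody, PySem.List.foldl_add, hkeys]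
  simp [pvS]

-- ===== VERDICT (by name: the statement is the Claim_ definition above) =====
theorem find_intervals_with_same_sum_spec : Claim_equal_find_intervals_with_same_sum := by
  intro sequence _
  unfold Spec_find_intervals_with_same_sum
  rw [pv_A_eq, pv_B_eq]
  have h := pv_S_across ((pvPairs (sequence.length : Int)).map (pvKey sequence)) []
  simpa [pvS] using h
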